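-- pv_equiv track=rewrite | github.com/patlkwok/pps-mutation | mutation/g5/Mutagen.py | identify_intervals
-- ===== SOURCE A (Python) =====
-- def identify_intervals(genome, mutated, m):
--     """
--     Inspired by Agglomerative Heirarchical Clustering
--
--     :genome
--         The original sequence of genes
--     :mutated
--         The mutated sequence of genes
--     :m
--         Number of mutations performed by the mutagen
--
--     Returns
--     _______
--         The most likely sequence of indices of mutated regions,
--         based on heuristic = length of mutation
--     """
--     if m == 0: return []
--
--     diffs = [(idx, idx) for idx, (c1, c2) in enumerate(zip(genome, mutated)) if c1 != c2]
--
--     while len(diffs) > m: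
--         min_merge_length, minidx = min(
--             (diffs[i][1]-diffs[i-1][0], i)
--             for i in range(1, len(diffs))
--         )
--
--         diffs[minidx-1] = (diffs[minidx-1][0], diffs.pop(minidx)[1])
--
--     return diffs
-- ===== SOURCE B (Python) =====
-- def identify_intervals(genome, mutated, m):
--     """Linked-list blocks + a lazily-invalidated sorted candidate queue instead of
--     rescanning all adjacent pairs each round."""
--     if m == 0: return []
--     pts = [idx for idx, (c1, c2) in enumerate(zip(genome, mutated)) if c1 != c2]
--     n = len(pts)
--     if n <= m:
--         return [(p, p) for p in pts]
--     prev = [i - 1 for i in range(n)]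
--     nxt = [i + 1 for i in range(n)]
--     right = [i for i in range(n)]
--     alive = [True] * n
--     # candidate queue: entries (key, rid, lid, rexp), kept sorted ascending (lex)
--     q = []
--     for i in range(1, n):
--         _insort(q, (pts[i] - pts[i - 1], i, i - 1, i))
--     for _ in range(n - m):
--         while True:
--             e = q.pop(0)
--             key, rid, lid, rexp = e
--             if alive[rid] and prev[rid] == lid and right[rid] == rexp:
--                 break
--         # merge block rid into block lid
--         right[lid] = right[rid]
--         alive[rid] = False
--         nx = nxt[rid]
--         nxt[lid] = nx
--         if nx < n:
--             prev[nx] = lid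
--         pl = prev[lid]
--         if pl >= 0:
--             _insort(q, (pts[right[lid]] - pts[pl], lid, pl, right[lid]))
--         if nx < n:
--             _insort(q, (pts[right[nx]] - pts[lid], nx, lid, right[nx]))
--     return [(pts[i], pts[right[i]]) for i in range(n) if alive[i]]
--
--
-- def _insort(q, e):
--     lo, hi = 0, len(q)
--     while lo < hi:
--         mid = (lo + hi) // 2
--         if e < q[mid]:
--             hi = mid
--         else:
--             lo = mid + 1
--     q.insert(lo, e)
-- ===== Notes on version B (the rewrite author's own statement) =====
-- stated objective: faster
-- what changed: Replaces A's per-round Python-level rescan of all adjacent pairs (plus list.pop) by a doubly-linked list of blocks and a lazily-invalidated sorted candidate queue with binary-search insertion, so each merge needs O(log n) comparisons instead of an O(n) scan.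
import Mathlib
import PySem

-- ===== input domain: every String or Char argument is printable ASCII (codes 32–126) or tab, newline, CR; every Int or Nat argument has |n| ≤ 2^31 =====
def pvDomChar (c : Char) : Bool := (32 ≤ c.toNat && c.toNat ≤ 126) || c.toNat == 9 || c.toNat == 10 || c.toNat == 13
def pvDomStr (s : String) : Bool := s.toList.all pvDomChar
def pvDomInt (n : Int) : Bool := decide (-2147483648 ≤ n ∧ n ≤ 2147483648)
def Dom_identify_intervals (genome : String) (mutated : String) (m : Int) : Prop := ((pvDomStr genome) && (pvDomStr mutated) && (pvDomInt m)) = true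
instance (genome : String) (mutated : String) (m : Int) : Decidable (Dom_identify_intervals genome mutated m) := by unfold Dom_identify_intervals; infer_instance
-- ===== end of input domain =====

-- B replaces A's per-round rescan of all adjacent pairs by a linked-list of blocks plus a
-- lazily-invalidated sorted candidate queue; equivalence of the RETURN values is proved below.

-- ===== PORT A =====

-- the generator '(diffs[i][1]-diffs[i-1][0], i) for i in range(1, len(diffs))'
def pvAKeys (diffs : List (Int × Int)) : List (Int × Int) :=
  (PySem.List.pyRange 1 (diffs.length : Int) 1).map
    (fun i => ((PySem.List.pyGetD diffs i (0, 0)).2 - (PySem.List.pyGetD diffs (i - 1) (0, 0)).1, i))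

-- 'while len(diffs) > m: … diffs[minidx-1] = (diffs[minidx-1][0], diffs.pop(minidx)[1])'
def pvALoop (m : Int) (diffs : List (Int × Int)) : List (Int × Int) :=
  if (m : Int) < (diffs.length : Int) then
    match PySem.List.min2? (pvAKeys diffs) (·.1) (·.2) with
    | none => diffs   -- Python raises ValueError (min of an empty generator); outside Pre_
    | some km =>
      let minidx := km.2
      let prevEntry := PySem.List.pyGetD diffs (minidx - 1) (0, 0)
      match hp : PySem.List.pop? diffs minidx with
      | none => diffs   -- IndexError; unreachable
      | some pr =>
        pvALoop m (PySem.List.pySetD pr.2 (minidx - 1) (prevEntry.1, pr.1.2))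
  else diffs
termination_by diffs.length
decreasing_by
  have h1 := PySem.List.length_of_pop?_eq_some _ hp
  simp [PySem.List.length_pySetD]
  omega

def identify_intervals (genome : String) (mutated : String) (m : Int) : List (Int × Int) :=
  if m = 0 then []
  else
    let diffs := ((PySem.List.enumerate (genome.toList.zip mutated.toList)).filter
        (fun p => p.2.1 != p.2.2)).map (fun p => (p.1, p.1))
    pvALoop m diffs

-- ===== PORT B =====

-- queue entries are Python 4-tuples (key, rid, lid, rexp)
abbrev pvE : Type := Int × Int × Int × Int

-- Python's lexicographic '<' on those 4-tuples of ints
def pvELt (a b : pvE) : Bool :=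
  a.1 < b.1 || (a.1 == b.1 && (a.2.1 < b.2.1 || (a.2.1 == b.2.1 &&
    (a.2.2.1 < b.2.2.1 || (a.2.2.1 == b.2.2.1 && a.2.2.2 < b.2.2.2)))))

-- the 'while lo < hi' binary search of _insort
def pvInsPos (q : List pvE) (e : pvE) (lo hi : Int) : Int :=
  if lo < hi then
    let mid := PySem.Int.floordiv (lo + hi) 2
    if pvELt e (PySem.List.pyGetD q mid (0, 0, 0, 0)) then pvInsPos q e lo mid
    else pvInsPos q e (mid + 1) hi
  else lo
termination_by (hi - lo).toNat
decreasing_by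
  · have h1 := (PySem.Int.floordiv_lt_iff_lt_mul (a := lo + hi) (b := 2) (q := hi) (by omega)).2 (by omega)
    have h2 := (PySem.Int.le_floordiv_iff_mul_le (a := lo + hi) (b := 2) (q := lo) (by omega)).2 (by omega)
    omega
  · have h2 := (PySem.Int.le_floordiv_iff_mul_le (a := lo + hi) (b := 2) (q := lo) (by omega)).2 (by omega)
    have h1 := (PySem.Int.floordiv_lt_iff_lt_mul (a := lo + hi) (b := 2) (q := hi) (by omega)).2 (by omega)
    omega

def pvInsort (q : List pvE) (e : pvE) : List pvE :=
  PySem.List.insert q (pvInsPos q e 0 (q.length : Int)) e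

structure pvBState where
  prev : List Int
  nxt : List Int
  right : List Int
  alive : List Bool
  q : List pvE

-- 'alive[rid] and prev[rid] == lid and right[rid] == rexp'
def pvValid (s : pvBState) (e : pvE) : Bool :=
  PySem.List.pyGetD s.alive e.2.1 false &&
  (PySem.List.pyGetD s.prev e.2.1 0 == e.2.2.1) &&
  (PySem.List.pyGetD s.right e.2.1 0 == e.2.2.2)

-- 'while True: e = q.pop(0); … if valid: break'
def pvPopValid (qs : List pvE) (s : pvBState) : Option (pvE × List pvE) :=
  match qs with
  | [] => none   -- Python raises IndexError on q.pop(0); unreachable under Pre_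
  | e :: rest => if pvValid s e then some (e, rest) else pvPopValid rest s

-- one round of the outer 'for _ in range(n - m)' loop
def pvBStep (pts : List Int) (n : Int) (s : pvBState) : pvBState :=
  match pvPopValid s.q s with
  | none => s   -- unreachable under Pre_
  | some (e, q') =>
    let rid := e.2.1
    let lid := e.2.2.1
    let right' := PySem.List.pySetD s.right lid (PySem.List.pyGetD s.right rid 0)
    let alive' := PySem.List.pySetD s.alive rid false
    let nx := PySem.List.pyGetD s.nxt rid 0
    let nxt' := PySem.List.pySetD s.nxt lid nx
    let prev' := if nx < n then PySem.List.pySetD s.prev nx lid else s.prev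
    let pl := PySem.List.pyGetD prev' lid 0
    let q1 := if 0 ≤ pl then
        pvInsort q' (PySem.List.pyGetD pts (PySem.List.pyGetD right' lid 0) 0 -
          PySem.List.pyGetD pts pl 0, lid, pl, PySem.List.pyGetD right' lid 0)
      else q'
    let q2 := if nx < n then
        pvInsort q1 (PySem.List.pyGetD pts (PySem.List.pyGetD right' nx 0) 0 -
          PySem.List.pyGetD pts lid 0, nx, lid, PySem.List.pyGetD right' nx 0)
      else q1
    ⟨prev', nxt', right', alive', q2⟩

def pvBLoop (pts : List Int) (n : Int) : Nat → pvBState → pvBState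
  | 0, s => s
  | k + 1, s => pvBLoop pts n k (pvBStep pts n s)

def identify_intervals_alt (genome : String) (mutated : String) (m : Int) : List (Int × Int) :=
  if m = 0 then []
  else
    let pts := ((PySem.List.enumerate (genome.toList.zip mutated.toList)).filter
        (fun p => p.2.1 != p.2.2)).map (fun p => p.1)
    let n : Int := (pts.length : Int)
    if n ≤ m then pts.map (fun p => (p, p))
    else
      let s0 : pvBState :=
        ⟨(PySem.List.pyRange 0 n 1).map (fun i => i - 1),
         (PySem.List.pyRange 0 n 1).map (fun i => i + 1),
         PySem.List.pyRange 0 n 1,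
         List.replicate n.toNat true,
         (PySem.List.pyRange 1 n 1).foldl (fun q i =>
           pvInsort q (PySem.List.pyGetD pts i 0 - PySem.List.pyGetD pts (i - 1) 0, i, i - 1, i)) []⟩
      let sf := pvBLoop pts n (n - m).toNat s0
      (PySem.List.pyRange 0 n 1).foldl (fun acc i =>
        if PySem.List.pyGetD sf.alive i false then
          acc ++ [(PySem.List.pyGetD pts i 0,
                   PySem.List.pyGetD pts (PySem.List.pyGetD sf.right i 0) 0)]
        else acc) []

-- ===== PRECONDITION & SPEC =====
-- Pre_ excludes m < 0, on which Python A raises ValueError (min of an empty generator).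
def Pre_identify_intervals (genome : String) (mutated : String) (m : Int) : Prop := 0 ≤ m
instance (genome : String) (mutated : String) (m : Int) : Decidable (Pre_identify_intervals genome mutated m) := by unfold Pre_identify_intervals; infer_instance

def pvWitness_identify_intervals : String × String × Int := ("abcab", "abbbb", 2)

def Spec_identify_intervals (genome : String) (mutated : String) (m : Int) (out : List (Int × Int)) : Prop := out = identify_intervals_alt genome mutated m
instance (genome : String) (mutated : String) (m : Int) (out : List (Int × Int)) : Decidable (Spec_identify_intervals genome mutated m out) := by unfold Spec_identify_intervals; infer_instance

-- ===== CLAIM (what is proved, stated in full; the proofs are below) =====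
def Claim_equal_identify_intervals : Prop := ∀ (genome : String) (mutated : String) (m : Int), Dom_identify_intervals genome mutated m → Pre_identify_intervals genome mutated m → Spec_identify_intervals genome mutated m (identify_intervals genome mutated m)

-- ===== LEMMAS AND PROOFS =====

-- --- lexicographic order on queue entries ---

def pvLt (a b : pvE) : Prop :=
  a.1 < b.1 ∨ (a.1 = b.1 ∧ (a.2.1 < b.2.1 ∨ (a.2.1 = b.2.1 ∧
    (a.2.2.1 < b.2.2.1 ∨ (a.2.2.1 = b.2.2.1 ∧ a.2.2.2 < b.2.2.2)))))

def pvLe (a b : pvE) : Prop := ¬ pvLt b a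

lemma pvELt_eq_true_iff (a b : pvE) : pvELt a b = true ↔ pvLt a b := by
  simp [pvELt, pvLt]

lemma pvLt_asymm {a b : pvE} (h : pvLt a b) : ¬ pvLt b a := by
  obtain ⟨a1, a2, a3, a4⟩ := a; obtain ⟨b1, b2, b3, b4⟩ := b
  simp only [pvLt] at *; omega

lemma pvLt_of_pvLt_of_not_lt {e a b : pvE} (h1 : pvLt e a) (h2 : ¬ pvLt b a) : pvLt e b := by
  obtain ⟨a1, a2, a3, a4⟩ := a; obtain ⟨b1, b2, b3, b4⟩ := b; obtain ⟨e1, e2, e3, e4⟩ := e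
  simp only [pvLt] at *; omega

-- --- the binary search of _insort ---

lemma pvLt_irrefl (a : pvE) : ¬ pvLt a a := by
  obtain ⟨a1, a2, a3, a4⟩ := a; simp only [pvLt]; omega

lemma pvSorted_le {q : List pvE} (hq : q.Pairwise pvLe) {i j : Nat} (hij : i ≤ j)
    (hj : j < q.length) : pvLe q[i] q[j] := by
  rcases Nat.lt_or_ge i j with h | h
  · exact (List.pairwise_iff_getElem.1 hq) i j (by omega) hj h
  · have : i = j := by omega
    subst this; exact pvLt_irrefl _

lemma pvInsPos_spec (q : List pvE) (e : pvE) (hq : q.Pairwise pvLe) :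
    ∀ (lo hi : Int), 0 ≤ lo → lo ≤ hi → hi ≤ (q.length : Int) →
    (∀ (j : Nat) (hj : j < q.length), (j : Int) < lo → ¬ pvLt e q[j]) →
    (∀ (j : Nat) (hj : j < q.length), hi ≤ (j : Int) → pvLt e q[j]) →
    ∃ r : Nat, pvInsPos q e lo hi = (r : Int) ∧ (r ≤ q.length) ∧
      (∀ (j : Nat) (hj : j < q.length), j < r → ¬ pvLt e q[j]) ∧
      (∀ (j : Nat) (hj : j < q.length), r ≤ j → pvLt e q[j]) := by
  suffices H : ∀ (fuel : Nat) (lo hi : Int), (hi - lo).toNat ≤ fuel → 0 ≤ lo → lo ≤ hi →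
      hi ≤ (q.length : Int) →
      (∀ (j : Nat) (hj : j < q.length), (j : Int) < lo → ¬ pvLt e q[j]) →
      (∀ (j : Nat) (hj : j < q.length), hi ≤ (j : Int) → pvLt e q[j]) →
      ∃ r : Nat, pvInsPos q e lo hi = (r : Int) ∧ (r ≤ q.length) ∧
        (∀ (j : Nat) (hj : j < q.length), j < r → ¬ pvLt e q[j]) ∧
        (∀ (j : Nat) (hj : j < q.length), r ≤ j → pvLt e q[j]) by
    intro lo hi h0 h1 h2 h3 h4
    exact H (hi - lo).toNat lo hi le_rfl h0 h1 h2 h3 h4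
  intro fuel
  induction fuel with
  | zero =>
    intro lo hi hfuel h0 h1 h2 hlow hhigh
    have hlh : lo = hi := by omega
    subst hlh
    rw [pvInsPos, if_neg (by omega)]
    exact ⟨lo.toNat, by omega, by omega, fun j hj hjl => hlow j hj (by omega),
      fun j hj hjl => hhigh j hj (by omega)⟩
  | succ fuel ih =>
    intro lo hi hfuel h0 h1 h2 hlow hhigh
    by_cases hlh : lo < hi
    · have hmid1 := (PySem.Int.le_floordiv_iff_mul_le (a := lo + hi) (b := 2) (q := lo) (by omega)).2 (by omega)
      have hmid2 := (PySem.Int.floordiv_lt_iff_lt_mul (a := lo + hi) (b := 2) (q := hi) (by omega)).2 (by omega)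
      set mid := PySem.Int.floordiv (lo + hi) 2 with hmid
      have hmlen : mid < (q.length : Int) := by omega
      have hget : PySem.List.pyGetD q mid (0, 0, 0, 0) = q[mid.toNat]'(by omega) := by
        exact PySem.List.pyGetD_eq_getElem q _ (by omega) (by omega)
      rw [pvInsPos, if_pos hlh]
      simp only [← hmid, hget]
      by_cases hcmp : pvELt e (q[mid.toNat]'(by omega)) = true
      · rw [if_pos hcmp]
        have hlt : pvLt e (q[mid.toNat]'(by omega)) := (pvELt_eq_true_iff _ _).1 hcmp
        exact ih lo mid (by omega) h0 (by omega) (by omega) hlow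
          (fun j hj hjm => pvLt_of_pvLt_of_not_lt hlt (pvSorted_le hq (by omega) hj))
      · rw [if_neg hcmp]
        have hnlt : ¬ pvLt e (q[mid.toNat]'(by omega)) := by
          intro h; exact hcmp ((pvELt_eq_true_iff _ _).2 h)
        refine ih (mid + 1) hi (by omega) (by omega) (by omega) h2 ?_ hhigh
        intro j hj hjm
        intro hcon
        exact hnlt (pvLt_of_pvLt_of_not_lt hcon (pvSorted_le hq (by omega) (by omega)))
    · rw [pvInsPos, if_neg hlh]
      have hlh' : lo = hi := by omega
      subst hlh'
      exact ⟨lo.toNat, by omega, by omega, fun j hj hjl => hlow j hj (by omega),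
        fun j hj hjl => hhigh j hj (by omega)⟩

lemma pvInsert_eq (q : List pvE) (i : Int) (e : pvE) (h0 : 0 ≤ i) (h1 : i ≤ (q.length : Int)) :
    PySem.List.insert q i e = q.take i.toNat ++ e :: q.drop i.toNat := by
  simp only [PySem.List.insert, PySem.List.sliceIndices]
  norm_num
  rw [if_neg (by omega), min_eq_left (by omega)]

lemma pvInsort_props (q : List pvE) (e : pvE) (hq : q.Pairwise pvLe) :
    (pvInsort q e).Pairwise pvLe ∧ ∀ x, (x ∈ pvInsort q e ↔ x = e ∨ x ∈ q) := by
  obtain ⟨r, hr, hrlen, hlow, hhigh⟩ := pvInsPos_spec q e hq 0 (q.length : Int)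
    le_rfl (by omega) le_rfl (by intro j hj h; omega) (by intro j hj h; omega)
  have hins : pvInsort q e = q.take r ++ e :: q.drop r := by
    rw [pvInsort, hr, pvInsert_eq q _ e (by omega) (by omega)]
    simp
  constructor
  · rw [hins]
    rw [List.pairwise_append]
    refine ⟨hq.sublist (List.take_sublist _ _), ?_, ?_⟩
    · rw [List.pairwise_cons]
      refine ⟨?_, hq.sublist (List.drop_sublist _ _)⟩
      intro b hb
      obtain ⟨j, hj, rfl⟩ := List.getElem_of_mem hb
      rw [List.length_drop] at hj
      rw [List.getElem_drop]
      exact pvLt_asymm (hhigh (r + j) (by omega) (by omega))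
    · intro a ha b hb
      obtain ⟨i, hi, rfl⟩ := List.getElem_of_mem ha
      rw [List.length_take] at hi
      rw [List.getElem_take]
      rcases List.mem_cons.1 hb with rfl | hb'
      · exact hlow i (by omega) (by omega)
      · obtain ⟨j, hj, rfl⟩ := List.getElem_of_mem hb'
        rw [List.length_drop] at hj
        rw [List.getElem_drop]
        exact pvSorted_le hq (by omega) (by omega)
  · intro x
    rw [hins]
    simp only [List.mem_append, List.mem_cons]
    constructor
    · rintro (h | h | h)
      · exact Or.inr (List.mem_of_mem_take h)
      · exact Or.inl h
      · exact Or.inr (List.mem_of_mem_drop h)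
    · rintro (rfl | h)
      · exact Or.inr (Or.inl rfl)
      · rcases List.mem_append.1 (by rw [List.take_append_drop r q]; exact h :
          x ∈ q.take r ++ q.drop r) with h' | h'
        · exact Or.inl h'
        · exact Or.inr (Or.inr h')

-- --- pop-until-valid ---

lemma pvPopValid_eq {s : pvBState} : ∀ {qs : List pvE}, (∃ e ∈ qs, pvValid s e = true) →
    ∃ pre e rest, qs = pre ++ e :: rest ∧ (∀ x ∈ pre, pvValid s x = false) ∧
      pvValid s e = true ∧ pvPopValid qs s = some (e, rest) := by
  intro qs
  induction qs with
  | nil => rintro ⟨e, he, -⟩; exact absurd he (List.not_mem_nil)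
  | cons a rest ih =>
    rintro ⟨e, he, hv⟩
    by_cases ha : pvValid s a = true
    · exact ⟨[], a, rest, rfl, by simp, ha, by simp [pvPopValid, ha]⟩
    · have he' : e ∈ rest := by
        rcases List.mem_cons.1 he with h | h
        · subst h; exact absurd hv ha
        · exact h
      obtain ⟨pre, e', rest', h1, h2, h3, h4⟩ := ih ⟨e, he', hv⟩
      refine ⟨a :: pre, e', rest', by simp [h1], ?_, h3, ?_⟩
      · intro x hx
        rcases List.mem_cons.1 hx with h | h
        · subst h; simpa using ha
        · exact h2 x h
      · simpa [pvPopValid, ha] using h4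

-- --- min with tuple key: unique strict minimum ---

lemma pvFoldlMin_aux (p : Int × Int) (f : Option (Int × Int) → (Int × Int) → Option (Int × Int))
    (hf1 : ∀ x, f none x = some x)
    (hf2 : ∀ m x, f (some m) x =
      if (decide (x.1 < m.1) || !decide (m.1 < x.1) && decide (x.2 < m.2)) = true
      then some x else some m) :
    ∀ (l : List (Int × Int)) (acc : Option (Int × Int)),
      (p ∈ l ∨ acc = some p) → (∀ x ∈ l, x ≠ p → (p.1 < x.1 ∨ (p.1 = x.1 ∧ p.2 < x.2))) →
      (∀ a, acc = some a → a ≠ p → (p.1 < a.1 ∨ (p.1 = a.1 ∧ p.2 < a.2))) →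
      List.foldl f acc l = some p := by
  intro l
  induction l with
  | nil =>
    rintro acc (h | h) hmin2 hacc
    · exact absurd h (List.not_mem_nil)
    · simpa using h
  | cons x t ih =>
    rintro acc hin hmin2 hacc
    simp only [List.foldl_cons]
    rcases hacc' : acc with _ | m
    · rw [hf1]
      refine ih _ ?_ (fun y hy => hmin2 y (List.mem_cons_of_mem _ hy)) ?_
      · rcases hin with hin | hin
        · rcases List.mem_cons.1 hin with rfl | h
          · exact Or.inr rfl
          · exact Or.inl h
        · simp [hacc'] at hin
      · intro a ha hne
        obtain rfl : x = a := by simpa using ha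
        exact hmin2 x (List.mem_cons_self) hne
    · subst hacc'
      rw [hf2]
      have hnew : (if (decide (x.1 < m.1) || !decide (m.1 < x.1) && decide (x.2 < m.2)) = true
          then some x else some m) = some x ∨
          (if (decide (x.1 < m.1) || !decide (m.1 < x.1) && decide (x.2 < m.2)) = true
          then some x else some m) = some m := by
        split <;> simp
      refine ih _ ?_ (fun y hy => hmin2 y (List.mem_cons_of_mem _ hy)) ?_
      · rcases hin with hin | hin
        · rcases List.mem_cons.1 hin with h1 | h
          · right
            rw [← h1]
            by_cases hmp : m = p
            · rw [if_neg (by rw [hmp]; simp), hmp]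
            · have hlt := hacc m rfl hmp
              rw [if_pos (by simp; omega)]
          · exact Or.inl h
        · have hmp : m = p := by simpa using hin
          right
          rw [hmp]
          by_cases hxp : x = p
          · rw [if_neg (by rw [hxp]; simp)]
          · have hlt := hmin2 x (List.mem_cons_self) hxp
            rw [if_neg (by simp; omega)]
      · intro a ha hne
        rcases hnew with h | h
        · rw [h] at ha
          obtain rfl : x = a := by simpa using ha
          exact hmin2 x (List.mem_cons_self) hne
        · rw [h] at ha
          obtain rfl : m = a := by simpa using ha
          exact hacc m rfl hne

lemma pvMin2_eq_of_strict {l : List (Int × Int)} {p : Int × Int} (hp : p ∈ l)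
    (hmin : ∀ x ∈ l, x ≠ p → (p.1 < x.1 ∨ (p.1 = x.1 ∧ p.2 < x.2))) :
    PySem.List.min2? l (fun x => x.1) (fun x => x.2) = some p := by
  simp only [PySem.List.min2?]
  exact pvFoldlMin_aux p _ (fun x => rfl) (fun m x => rfl) l none (Or.inl hp) hmin
    (by intro a h; exact absurd h (by simp))

lemma pvPyRange_nil (a b : Int) (h : b ≤ a) : PySem.List.pyRange a b 1 = [] := by
  simp only [PySem.List.pyRange]
  rw [if_neg (by omega), if_pos (by omega), if_neg (by omega)]
  simp

lemma pvPyRange_natCast : ∀ (k : Nat) (a : Nat), PySem.List.pyRange (a : Int) ((a + k : Nat) : Int) 1 =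
    (List.range' a k).map (Nat.cast : Nat → Int) := by
  intro k
  induction k with
  | zero => intro a; rw [Nat.add_zero, pvPyRange_nil _ _ (by omega)]; simp
  | succ k ih =>
    intro a
    rw [PySem.List.pyRange_one_cons (by push_cast; omega)]
    have h1 : (a : Int) + 1 = ((a + 1 : Nat) : Int) := by push_cast; ring
    have h2 : ((a + (k + 1) : Nat) : Int) = (((a + 1) + k : Nat) : Int) := by push_cast; ring
    rw [h1, h2, ih (a + 1)]
    rw [List.range'_succ]
    simp

-- --- abstract view of B's state: hs = the ascending list of live block heads ---

def pvPtsD (pts : List Int) (i : Int) : Int := pts.getD i.toNat 0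

-- the canonical (up-to-date) queue entry for the adjacent block pair headed (a, b)
def pvCanon (pts right : List Int) (a b : Nat) : pvE :=
  (pvPtsD pts (right.getD b 0) - pts.getD a 0, (b : Int), (a : Int), right.getD b 0)

def pvEntryOK (pts : List Int) (e : pvE) : Prop :=
  1 ≤ e.2.1 ∧ e.2.1 < (pts.length : Int) ∧ 0 ≤ e.2.2.1 ∧ e.2.2.1 < e.2.1 ∧
  e.2.1 ≤ e.2.2.2 ∧ e.2.2.2 < (pts.length : Int) ∧
  e.1 = pvPtsD pts e.2.2.2 - pvPtsD pts e.2.2.1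

structure pvInv (pts : List Int) (hs : List Nat) (s : pvBState) : Prop where
  hlp : s.prev.length = pts.length
  hln : s.nxt.length = pts.length
  hlr : s.right.length = pts.length
  hla : s.alive.length = pts.length
  hne : hs ≠ []
  hhead : hs.getD 0 0 = 0
  hmono : hs.Pairwise (· < ·)
  hbnd : ∀ h ∈ hs, h < pts.length
  halive : ∀ i < pts.length, (s.alive.getD i false = true ↔ i ∈ hs)
  hnxt : ∀ j, j + 1 < hs.length → s.nxt.getD (hs.getD j 0) 0 = ((hs.getD (j+1) 0 : Nat) : Int)
  hprev : ∀ j, j + 1 < hs.length → s.prev.getD (hs.getD (j+1) 0) 0 = ((hs.getD j 0 : Nat) : Int)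
  hright : ∀ j, j + 1 < hs.length → s.right.getD (hs.getD j 0) 0 = ((hs.getD (j+1) 0 : Nat) : Int) - 1
  hprev0 : s.prev.getD 0 0 = -1
  hnxtlast : s.nxt.getD (hs.getD (hs.length - 1) 0) 0 = (pts.length : Int)
  hrightlast : s.right.getD (hs.getD (hs.length - 1) 0) 0 = (pts.length : Int) - 1
  hqok : ∀ e ∈ s.q, pvEntryOK pts e
  hqsorted : s.q.Pairwise pvLe
  hqcanon : ∀ j, j + 1 < hs.length → pvCanon pts s.right (hs.getD j 0) (hs.getD (j+1) 0) ∈ s.q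

def pvRepr (pts right : List Int) (hs : List Nat) : List (Int × Int) :=
  hs.map (fun h => (pts.getD h 0, pvPtsD pts (right.getD h 0)))

lemma pvRight_val {pts : List Int} {hs : List Nat} {s : pvBState} (inv : pvInv pts hs s)
    (j : Nat) (hj : j < hs.length) :
    s.right.getD (hs.getD j 0) 0 =
      (if j + 1 < hs.length then ((hs.getD (j+1) 0 : Nat) : Int) - 1 else (pts.length : Int) - 1) := by
  by_cases h : j + 1 < hs.length
  · rw [if_pos h]; exact inv.hright j h
  · rw [if_neg h]
    have : j = hs.length - 1 := by omega
    subst this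
    exact inv.hrightlast

lemma pvMono_getD {hs : List Nat} (hmono : hs.Pairwise (· < ·)) {i j : Nat}
    (hij : i < j) (hj : j < hs.length) : hs.getD i 0 < hs.getD j 0 := by
  rw [List.getD_eq_getElem _ _ (by omega), List.getD_eq_getElem _ _ hj]
  exact List.pairwise_iff_getElem.1 hmono i j (by omega) hj hij

lemma pvMono_le {hs : List Nat} (hmono : hs.Pairwise (· < ·)) :
    ∀ j, j < hs.length → j ≤ hs.getD j 0 := by
  intro j
  induction j with
  | zero => intro _; omega
  | succ i ih =>
    intro hj
    have h1 := pvMono_getD hmono (i := i) (j := i + 1) (by omega) hj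
    have h2 := ih (by omega)
    omega

lemma pvGetD_mem {hs : List Nat} {j : Nat} (hj : j < hs.length) : hs.getD j 0 ∈ hs := by
  rw [List.getD_eq_getElem _ _ hj]
  exact List.getElem_mem _

lemma pvValid_canon {pts : List Int} {hs : List Nat} {s : pvBState} (inv : pvInv pts hs s)
    (j : Nat) (hj : j + 1 < hs.length) :
    pvValid s (pvCanon pts s.right (hs.getD j 0) (hs.getD (j+1) 0)) = true := by
  simp only [pvValid, pvCanon, PySem.List.pyGetD_natCast]
  rw [(inv.halive _ (inv.hbnd _ (pvGetD_mem (by omega)))).2 (pvGetD_mem (by omega)),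
    inv.hprev j hj]
  simp

lemma pvValid_is_canon {pts : List Int} {hs : List Nat} {s : pvBState} (inv : pvInv pts hs s)
    {e : pvE} (hok : pvEntryOK pts e) (hv : pvValid s e = true) :
    ∃ j, j + 1 < hs.length ∧ e = pvCanon pts s.right (hs.getD j 0) (hs.getD (j+1) 0) := by
  obtain ⟨k, rid, lid, rexp⟩ := e
  obtain ⟨h1, h2, h3, h4, h5, h6, h7⟩ := hok
  simp only at h1 h2 h3 h4 h5 h6 h7
  simp only [pvValid, Bool.and_eq_true, beq_iff_eq] at hv
  obtain ⟨⟨halv, hprv⟩, hrt⟩ := hv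
  rw [PySem.List.pyGetD_of_nonneg _ _ (by omega)] at halv hprv hrt
  have hmem : rid.toNat ∈ hs := (inv.halive rid.toNat (by omega)).1 halv
  obtain ⟨idx, hidx, heq⟩ := List.mem_iff_getElem.1 hmem
  have hidx0 : idx ≠ 0 := by
    intro h
    subst h
    have : hs.getD 0 0 = rid.toNat := by rw [List.getD_eq_getElem _ _ hidx]; exact heq
    rw [inv.hhead] at this
    omega
  obtain ⟨j, rfl⟩ : ∃ j, idx = j + 1 := ⟨idx - 1, by omega⟩
  have hgd : hs.getD (j+1) 0 = rid.toNat := by rw [List.getD_eq_getElem _ _ hidx]; exact heq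
  refine ⟨j, hidx, ?_⟩
  have hprv' := inv.hprev j hidx
  rw [hgd] at hprv'
  rw [hprv'] at hprv
  have hlid : lid = ((hs.getD j 0 : Nat) : Int) := by omega
  simp only [pvCanon, hgd, Prod.mk.injEq]
  refine ⟨?_, by omega, by omega, by rw [hrt]⟩
  rw [h7, hrt, hlid]
  simp [pvPtsD]

lemma pvPyRange_one' (L : Nat) (h : 1 ≤ L) :
    PySem.List.pyRange 1 (L : Int) 1 = (List.range' 1 (L-1)).map (Nat.cast : Nat → Int) := by
  have h2 := pvPyRange_natCast (L - 1) 1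
  rw [show ((1 + (L-1) : Nat) : Int) = (L : Int) by omega] at h2
  rw [show (1 : Int) = ((1 : Nat) : Int) by norm_num]
  exact h2

lemma pvRepr_getD (pts right : List Int) (hs : List Nat) {j : Nat} (hj : j < hs.length) :
    (pvRepr pts right hs).getD j (0, 0) =
      (pts.getD (hs.getD j 0) 0, pvPtsD pts (right.getD (hs.getD j 0) 0)) := by
  unfold pvRepr
  rw [List.getD_eq_getElem _ _ (by simpa using hj), List.getElem_map,
    List.getD_eq_getElem _ _ hj]

lemma pvAKeys_repr (pts right : List Int) (hs : List Nat) :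
    pvAKeys (pvRepr pts right hs) =
      (List.range' 1 (hs.length - 1)).map
        (fun j => ((pvCanon pts right (hs.getD (j-1) 0) (hs.getD j 0)).1, (j : Int))) := by
  unfold pvAKeys
  rw [show ((pvRepr pts right hs).length : Int) = ((hs.length : Nat) : Int) by simp [pvRepr]]
  rcases Nat.eq_zero_or_pos hs.length with h0 | hpos
  · rw [h0]
    rw [pvPyRange_nil 1 ((0 : Nat) : Int) (by omega)]
    simp
  · rw [pvPyRange_one' hs.length (by omega)]
    apply List.ext_getElem
    · simp
    · intro i h1 h2
      simp only [List.getElem_map, List.getElem_range']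
      have hi : i < hs.length - 1 := by simpa using h2
      rw [show (1 + 1 * i) = (1 + i) by omega]
      rw [show ((1 + i : Nat) : Int) - 1 = ((i : Nat) : Int) by omega]
      rw [PySem.List.pyGetD_natCast, PySem.List.pyGetD_natCast]
      rw [pvRepr_getD pts right hs (by omega), pvRepr_getD pts right hs (by omega)]
      simp [pvCanon]

lemma pvRight_nonneg {pts : List Int} {hs : List Nat} {s : pvBState} (inv : pvInv pts hs s)
    {h : Nat} (hmem : h ∈ hs) :
    0 ≤ s.right.getD h 0 ∧ s.right.getD h 0 < (pts.length : Int) := by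
  obtain ⟨j, hj, rfl⟩ := List.mem_iff_getElem.1 hmem
  rw [← List.getD_eq_getElem _ 0 hj]
  rw [pvRight_val inv j hj]
  have hn1 : 1 ≤ pts.length := by
    have := inv.hbnd _ hmem
    omega
  by_cases hcase : j + 1 < hs.length
  · rw [if_pos hcase]
    have := pvMono_le inv.hmono (j+1) hcase
    have := inv.hbnd _ (pvGetD_mem hcase)
    exact ⟨by omega, by omega⟩
  · rw [if_neg hcase]
    exact ⟨by omega, by omega⟩

lemma pvGetD_set {α : Type} (l : List α) (i j : Nat) (v d : α) (hj : j < l.length) :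
    (l.set i v).getD j d = if i = j then v else l.getD j d := by
  rw [List.getD_eq_getElem _ _ (by simpa using hj), List.getElem_set]
  split_ifs with h
  · rfl
  · rw [List.getD_eq_getElem _ _ hj]

lemma pvMono_getD_ne {hs : List Nat} (hmono : hs.Pairwise (· < ·)) {i j : Nat}
    (hi : i < hs.length) (hj : j < hs.length) (hij : i ≠ j) : hs.getD i 0 ≠ hs.getD j 0 := by
  rcases Nat.lt_or_ge i j with h | h
  · exact Nat.ne_of_lt (pvMono_getD hmono h hj)
  · exact Nat.ne_of_gt (pvMono_getD hmono (by omega) hi)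

lemma pvStep_main (pts : List Int) (hs : List Nat) (s : pvBState) (inv : pvInv pts hs s)
    (h2 : 2 ≤ hs.length) :
    ∃ hs', pvInv pts hs' (pvBStep pts (pts.length : Int) s) ∧ hs'.length + 1 = hs.length ∧
      ∀ m : Int, m < (hs.length : Int) →
        pvALoop m (pvRepr pts s.right hs) =
        pvALoop m (pvRepr pts (pvBStep pts (pts.length : Int) s).right hs') := by
  obtain ⟨pre, e₀, q', hsplit, hpreinv, hval, hpop⟩ := pvPopValid_eq (s := s) (qs := s.q)
    ⟨pvCanon pts s.right (hs.getD 0 0) (hs.getD 1 0), inv.hqcanon 0 (by omega),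
     pvValid_canon inv 0 (by omega)⟩
  have hq'sorted : q'.Pairwise pvLe := by
    have := hsplit ▸ inv.hqsorted
    exact ((List.pairwise_append.1 this).2.1).sublist (List.sublist_cons_self _ _)
  have he₀le : ∀ x ∈ q', pvLe e₀ x := by
    have := hsplit ▸ inv.hqsorted
    exact (List.pairwise_cons.1 (List.pairwise_append.1 this).2.1).1
  obtain ⟨jm, hjm, hecanon⟩ := pvValid_is_canon inv
    (inv.hqok e₀ (by rw [hsplit]; simp)) hval
  -- abbreviations
  set n := pts.length with hn
  set a := hs.getD jm 0 with ha
  set b := hs.getD (jm+1) 0 with hb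
  have hab : a < b := pvMono_getD inv.hmono (by omega) hjm
  have hbn : b < n := inv.hbnd _ (pvGetD_mem hjm)
  have han : a < n := by omega
  have haj : jm ≤ a := pvMono_le inv.hmono jm (by omega)
  have hbj : jm + 1 ≤ b := pvMono_le inv.hmono (jm+1) hjm
  -- minimality of the popped entry among canonical entries
  have hmin : ∀ j, j + 1 < hs.length →
      ¬ pvLt (pvCanon pts s.right (hs.getD j 0) (hs.getD (j+1) 0)) e₀ := by
    intro j hj
    have hcq : pvCanon pts s.right (hs.getD j 0) (hs.getD (j+1) 0) ∈ s.q := inv.hqcanon j hj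
    rw [hsplit] at hcq
    rcases List.mem_append.1 hcq with h | h
    · exact absurd (pvValid_canon inv j hj) (by rw [hpreinv _ h]; simp)
    · rcases List.mem_cons.1 h with h | h
      · rw [h]; exact pvLt_irrefl _
      · exact he₀le _ h
  -- the B step, componentwise
  have hL := inv.hlp
  have hLn := inv.hln
  have hLr := inv.hlr
  have hLa := inv.hla
  have hrid : e₀.2.1 = ((b : Nat) : Int) := by rw [hecanon]; rfl
  have hlid : e₀.2.2.1 = ((a : Nat) : Int) := by rw [hecanon]; rfl
  have hnxv : PySem.List.pyGetD s.nxt ((b : Nat) : Int) 0 =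
      (if jm + 2 < hs.length then ((hs.getD (jm+2) 0 : Nat) : Int) else ((n : Nat) : Int)) := by
    rw [PySem.List.pyGetD_natCast]
    by_cases h : jm + 2 < hs.length
    · rw [if_pos h]
      have := inv.hnxt (jm+1) (by omega)
      rw [show jm + 1 + 1 = jm + 2 by omega] at this
      exact this
    · rw [if_neg h]
      have := inv.hnxtlast
      rw [show hs.length - 1 = jm + 1 by omega] at this
      exact this
  have hRv : PySem.List.pyGetD s.right ((b : Nat) : Int) 0 = s.right.getD b 0 :=
    PySem.List.pyGetD_natCast _ _ _
  have hRval : s.right.getD b 0 =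
      (if jm + 2 < hs.length then ((hs.getD (jm+2) 0 : Nat) : Int) - 1 else ((n : Nat) : Int) - 1) := by
    have := pvRight_val inv (jm+1) hjm
    rw [show jm + 1 + 1 = jm + 2 by omega] at this
    exact this
  have hRnn : 0 ≤ s.right.getD b 0 ∧ s.right.getD b 0 < ((n : Nat) : Int) :=
    pvRight_nonneg inv (pvGetD_mem hjm)

  have hbne : ∀ {k : Nat}, k < hs.length → k ≠ jm → hs.getD k 0 ≠ a := by
    intro k hk hkj
    exact pvMono_getD_ne inv.hmono hk (by omega) hkj
  have hprevav : s.prev.getD a 0 = (if 1 ≤ jm then ((hs.getD (jm-1) 0 : Nat) : Int) else -1) := by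
    by_cases h0 : 1 ≤ jm
    · rw [if_pos h0]
      have := inv.hprev (jm-1) (by omega)
      rw [show jm - 1 + 1 = jm by omega] at this
      exact this
    · rw [if_neg h0]
      have ha0 : a = 0 := by
        rw [ha, show jm = 0 by omega]
        exact inv.hhead
      rw [ha0]
      exact inv.hprev0
  -- the merged state, fully computed
  set R := s.right.getD b 0 with hRdef
  set ent1 : pvE := (pvPtsD pts R - pts.getD (hs.getD (jm-1) 0) 0, ((a : Nat) : Int),
    ((hs.getD (jm-1) 0 : Nat) : Int), R) with hent1
  set ent2 : pvE := (pvPtsD pts (s.right.getD (hs.getD (jm+2) 0) 0) - pts.getD a 0,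
    ((hs.getD (jm+2) 0 : Nat) : Int), ((a : Nat) : Int),
    s.right.getD (hs.getD (jm+2) 0) 0) with hent2
  have hstate : pvBStep pts (n : Int) s = pvBState.mk
      (if jm + 2 < hs.length then s.prev.set (hs.getD (jm+2) 0) ((a : Nat) : Int) else s.prev)
      (s.nxt.set a (if jm + 2 < hs.length then ((hs.getD (jm+2) 0 : Nat) : Int) else ((n : Nat) : Int)))
      (s.right.set a R)
      (s.alive.set b false)
      (if 1 ≤ jm then
        (if jm + 2 < hs.length then pvInsort (pvInsort q' ent1) ent2 else pvInsort q' ent1)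
       else
        (if jm + 2 < hs.length then pvInsort q' ent2 else q')) := by
    have hgetRa : (s.right.set a R).getD a 0 = R := by
      rw [pvGetD_set _ _ _ _ _ (by omega), if_pos rfl]
    have hpa : PySem.List.pyGetD pts R 0 = pvPtsD pts R := by
      rw [PySem.List.pyGetD_of_nonneg _ _ hRnn.1]
      rfl
    rw [pvBStep, hpop]
    simp only [hrid, hlid, hnxv, hRv, ← hRdef]
    by_cases h1 : jm + 2 < hs.length
    · have hc : ((hs.getD (jm+2) 0 : Nat) : Int) < ((n : Nat) : Int) := by
        exact_mod_cast inv.hbnd _ (pvGetD_mem h1)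
      have hc2 : hs.getD (jm+2) 0 ≠ a := hbne h1 (by omega)
      simp only [if_pos h1, if_pos hc, PySem.List.pySetD_natCast]
      have hpla : (s.prev.set (hs.getD (jm+2) 0) ((a : Nat) : Int)).getD a 0 = s.prev.getD a 0 := by
        rw [pvGetD_set _ _ _ _ _ (by omega), if_neg hc2]
      have hra2 : (s.right.set a R).getD (hs.getD (jm+2) 0) 0 = s.right.getD (hs.getD (jm+2) 0) 0 := by
        rw [pvGetD_set _ _ _ _ _ (by omega), if_neg (by omega)]
      have hpn2 : 0 ≤ s.right.getD (hs.getD (jm+2) 0) 0 :=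
        (pvRight_nonneg inv (pvGetD_mem h1)).1
      simp only [PySem.List.pyGetD_natCast, hpla, hprevav, hgetRa, hra2, hpa]
      rw [PySem.List.pyGetD_of_nonneg _ _ hpn2]
      by_cases h0 : 1 ≤ jm
      · have hple : (0 : Int) ≤ ((hs.getD (jm-1) 0 : Nat) : Int) := by positivity
        simp only [if_pos h0, if_pos hple, PySem.List.pyGetD_natCast]
        rfl
      · simp only [if_neg h0, if_neg (by omega : ¬ (0 : Int) ≤ -1)]
        rfl
    · have hcn : ¬ ((n : Nat) : Int) < ((n : Nat) : Int) := by omega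
      simp only [if_neg h1, if_neg hcn, PySem.List.pySetD_natCast]
      simp only [PySem.List.pyGetD_natCast, hprevav, hgetRa, hpa]
      by_cases h0 : 1 ≤ jm
      · have hple : (0 : Int) ≤ ((hs.getD (jm-1) 0 : Nat) : Int) := by positivity
        simp only [if_pos h0, if_pos hple, PySem.List.pyGetD_natCast]
        rfl
      · simp only [if_neg h0, if_neg (by omega : ¬ (0 : Int) ≤ -1)]
  -- the new list of live heads
  set hs' := hs.eraseIdx (jm+1) with hhs'
  have hbndD : ∀ {k : Nat}, k < hs.length → hs.getD k 0 < n := fun hk => inv.hbnd _ (pvGetD_mem hk)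
  have hlen' : hs'.length = hs.length - 1 := by
    rw [hhs', List.length_eraseIdx, if_pos (by omega)]
  have herase : ∀ i, i < hs.length - 1 →
      hs'.getD i 0 = if i < jm + 1 then hs.getD i 0 else hs.getD (i+1) 0 := by
    intro i hi
    rw [hhs', List.getD_eq_getElem _ _ (by rw [List.length_eraseIdx]; split_ifs <;> omega)]
    rw [List.getElem_eraseIdx]
    split_ifs with h
    · rw [List.getD_eq_getElem _ _ (by omega)]
    · rw [List.getD_eq_getElem _ _ (by omega)]
  have hmem_erase : ∀ x : Nat, x ∈ hs' ↔ (x ∈ hs ∧ x ≠ b) := by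
    intro x
    constructor
    · intro hx
      obtain ⟨i, hi, rfl⟩ := List.mem_iff_getElem.1 hx
      rw [← List.getD_eq_getElem _ 0 hi]
      have hi' : i < hs.length - 1 := by omega
      rw [herase i hi']
      split_ifs with h
      · exact ⟨pvGetD_mem (by omega), pvMono_getD_ne inv.hmono (by omega) hjm (by omega)⟩
      · exact ⟨pvGetD_mem (by omega), pvMono_getD_ne inv.hmono (by omega) hjm (by omega)⟩
    · rintro ⟨hx, hxb⟩
      obtain ⟨k, hk, rfl⟩ := List.mem_iff_getElem.1 hx
      have hkne : k ≠ jm + 1 := by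
        intro h
        subst h
        exact hxb (by rw [← List.getD_eq_getElem _ 0 hk])
      rcases Nat.lt_or_ge k (jm+1) with h | h
      · have : hs'.getD k 0 = hs[k] := by
          rw [herase k (by omega), if_pos h, List.getD_eq_getElem _ _ hk]
        rw [← this]
        exact pvGetD_mem (by omega)
      · have hk1 : k - 1 < hs.length - 1 := by omega
        have : hs'.getD (k-1) 0 = hs[k] := by
          rw [herase (k-1) hk1, if_neg (by omega), show k - 1 + 1 = k by omega,
            List.getD_eq_getElem _ _ hk]
        rw [← this]
        exact pvGetD_mem (by omega)
  have hgetRa : (s.right.set a R).getD a 0 = R := by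
    rw [pvGetD_set _ _ _ _ _ (by omega), if_pos rfl]
  have hq1s := pvInsort_props q' ent1 hq'sorted
  have hq12s := pvInsort_props (pvInsort q' ent1) ent2 hq1s.1
  have hq2s' := pvInsort_props q' ent2 hq'sorted
  have hQsorted : (if 1 ≤ jm then
        (if jm + 2 < hs.length then pvInsort (pvInsort q' ent1) ent2 else pvInsort q' ent1)
       else
        (if jm + 2 < hs.length then pvInsort q' ent2 else q')).Pairwise pvLe := by
    split_ifs
    · exact hq12s.1
    · exact hq1s.1
    · exact hq2s'.1
    · exact hq'sorted
  have hQmem : ∀ x, (x ∈ (if 1 ≤ jm then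
        (if jm + 2 < hs.length then pvInsort (pvInsort q' ent1) ent2 else pvInsort q' ent1)
       else
        (if jm + 2 < hs.length then pvInsort q' ent2 else q')) ↔
      (x ∈ q' ∨ (1 ≤ jm ∧ x = ent1) ∨ (jm + 2 < hs.length ∧ x = ent2))) := by
    intro x
    split_ifs with h0 h1 h1
    · rw [hq12s.2 x, hq1s.2 x]
      constructor
      · rintro (rfl | rfl | h) <;> tauto
      · rintro (h | ⟨-, rfl⟩ | ⟨-, rfl⟩) <;> tauto
    · rw [hq1s.2 x]
      constructor
      · rintro (rfl | h) <;> tauto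
      · rintro (h | ⟨-, rfl⟩ | ⟨h, -⟩) <;> tauto
    · rw [hq2s'.2 x]
      constructor
      · rintro (rfl | h) <;> tauto
      · rintro (h | ⟨h, -⟩ | ⟨-, rfl⟩) <;> tauto
    · constructor
      · tauto
      · rintro (h | ⟨h, -⟩ | ⟨h, -⟩) <;> tauto
  have hcanon_q' : ∀ j, j + 1 < hs.length → j + 1 ≠ jm + 1 →
      pvCanon pts s.right (hs.getD j 0) (hs.getD (j+1) 0) ∈ q' := by
    intro j hj hne
    have hin := inv.hqcanon j hj
    rw [hsplit] at hin
    rcases List.mem_append.1 hin with h | h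
    · exact absurd (pvValid_canon inv j hj) (by rw [hpreinv _ h]; simp)
    · rcases List.mem_cons.1 h with h | h
      · exfalso
        have := congrArg (fun e : pvE => e.2.1) h
        simp only [pvCanon] at this
        rw [hrid] at this
        have hb' : hs.getD (j+1) 0 = b := by exact_mod_cast this
        exact pvMono_getD_ne inv.hmono hj hjm (by omega) hb'
      · exact h
  have hgj_lt : ∀ (j : Nat), j < jm + 1 → j < hs.length - 1 → hs'.getD j 0 = hs.getD j 0 := by
    intro j h1 h2
    rw [herase j h2, if_pos h1]
  have hgj_ge : ∀ (j : Nat), ¬ (j < jm + 1) → j < hs.length - 1 → hs'.getD j 0 = hs.getD (j+1) 0 := by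
    intro j h1 h2
    rw [herase j h2, if_neg h1]
  have hsetN : ∀ {k : Nat} (v : Int), k < hs.length → k ≠ jm →
      (s.nxt.set a v).getD (hs.getD k 0) 0 = s.nxt.getD (hs.getD k 0) 0 := by
    intro k v hk hkj
    rw [pvGetD_set _ _ _ _ _ (by rw [hLn]; exact hbndD hk),
      if_neg (fun hh => (hbne hk hkj) hh.symm)]
  have hsetR : ∀ {k : Nat}, k < hs.length → k ≠ jm →
      (s.right.set a R).getD (hs.getD k 0) 0 = s.right.getD (hs.getD k 0) 0 := by
    intro k hk hkj
    rw [pvGetD_set _ _ _ _ _ (by rw [hLr]; exact hbndD hk),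
      if_neg (fun hh => (hbne hk hkj) hh.symm)]
  have hsetNa : ∀ (v : Int), (s.nxt.set a v).getD a 0 = v := by
    intro v
    rw [pvGetD_set _ _ _ _ _ (by rw [hLn]; omega), if_pos rfl]
  have hinv' : pvInv pts hs' (pvBStep pts (n : Int) s) := by
    rw [hstate]
    refine ⟨?_, ?_, ?_, ?_, ?_, ?_, ?_, ?_, ?_, ?_, ?_, ?_, ?_, ?_, ?_, ?_, ?_, ?_⟩
    · -- hlp
      simp only []
      split_ifs <;> simp [hL]
    · simp [hLn]
    · simp [hLr]
    · simp [hLa]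
    · -- hne
      intro h
      rw [h] at hlen'
      simp at hlen'
      omega
    · -- hhead
      rw [hgj_lt 0 (by omega) (by omega)]
      exact inv.hhead
    · -- hmono
      rw [hhs']
      exact inv.hmono.sublist (List.eraseIdx_sublist hs (jm+1))
    · -- hbnd
      intro h hm
      exact inv.hbnd h ((hmem_erase h).1 hm).1
    · -- halive
      intro i hi
      simp only []
      rw [pvGetD_set _ _ _ _ _ (by omega)]
      by_cases hib : b = i
      · rw [if_pos hib]
        subst hib
        rw [hmem_erase]
        simp
      · rw [if_neg hib]
        rw [hmem_erase]
        have := inv.halive i hi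
        simp only [this]
        constructor
        · intro h; exact ⟨h, fun hh => hib hh.symm⟩
        · tauto
    · -- hnxt
      intro j hj
      rw [hlen'] at hj
      simp only []
      by_cases hc1 : j < jm
      · rw [hgj_lt j (by omega) (by omega), hgj_lt (j+1) (by omega) (by omega),
          hsetN _ (by omega) (by omega)]
        exact inv.hnxt j (by omega)
      · by_cases hc2 : j = jm
        · subst hc2
          rw [hgj_lt j (by omega) (by omega), hgj_ge (j+1) (by omega) (by omega), ← ha, hsetNa,
            if_pos (show j + 2 < hs.length by omega), show j + 1 + 1 = j + 2 by omega]
        · rw [hgj_ge j (by omega) (by omega), hgj_ge (j+1) (by omega) (by omega),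
            hsetN _ (by omega) (by omega)]
          exact inv.hnxt (j+1) (by omega)
    · -- hprev
      intro j hj
      rw [hlen'] at hj
      simp only []
      have hunch : ∀ {k : Nat}, k < hs.length → k ≠ jm + 2 →
          (if jm + 2 < hs.length then s.prev.set (hs.getD (jm+2) 0) ((a : Nat) : Int)
            else s.prev).getD (hs.getD k 0) 0 = s.prev.getD (hs.getD k 0) 0 := by
        intro k hk hkj
        split_ifs with h1
        · rw [pvGetD_set _ _ _ _ _ (by rw [hL]; exact hbndD hk),
            if_neg (pvMono_getD_ne inv.hmono h1 hk hkj.symm)]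
        · rfl
      by_cases hc1 : j < jm
      · rw [hgj_lt j (by omega) (by omega), hgj_lt (j+1) (by omega) (by omega),
          hunch (by omega) (by omega)]
        exact inv.hprev j (by omega)
      · by_cases hc2 : j = jm
        · subst hc2
          rw [hgj_lt j (by omega) (by omega), hgj_ge (j+1) (by omega) (by omega), ← ha,
            show j + 1 + 1 = j + 2 by omega]
          rw [if_pos (show j + 2 < hs.length by omega)]
          rw [pvGetD_set _ _ _ _ _ (by rw [hL]; exact hbndD (by omega)), if_pos rfl]
        · rw [hgj_ge j (by omega) (by omega), hgj_ge (j+1) (by omega) (by omega),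
            hunch (by omega) (by omega)]
          exact inv.hprev (j+1) (by omega)
    · -- hright
      intro j hj
      rw [hlen'] at hj
      simp only []
      by_cases hc1 : j < jm
      · rw [hgj_lt j (by omega) (by omega), hgj_lt (j+1) (by omega) (by omega),
          hsetR (by omega) (by omega)]
        exact inv.hright j (by omega)
      · by_cases hc2 : j = jm
        · subst hc2
          rw [hgj_lt j (by omega) (by omega), hgj_ge (j+1) (by omega) (by omega), ← ha]
          rw [pvGetD_set _ _ _ _ _ (by rw [hLr]; omega), if_pos rfl]
          rw [hRval, if_pos (show j + 2 < hs.length by omega), show j + 1 + 1 = j + 2 by omega]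
        · rw [hgj_ge j (by omega) (by omega), hgj_ge (j+1) (by omega) (by omega),
            hsetR (by omega) (by omega)]
          exact inv.hright (j+1) (by omega)
    · -- hprev0
      simp only []
      split_ifs with h1
      · rw [pvGetD_set _ _ _ _ _ (by rw [hL]; omega)]
        rw [if_neg ?_]
        · exact inv.hprev0
        · have : b < hs.getD (jm+2) 0 := pvMono_getD inv.hmono (by omega) (by omega)
          omega
      · exact inv.hprev0
    · -- hnxtlast
      have hidx : hs'.length - 1 = hs.length - 2 := by omega
      rw [hidx]
      simp only []
      by_cases hlast : jm + 1 = hs.length - 1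
      · rw [hgj_lt (hs.length - 2) (by omega) (by omega), show hs.getD (hs.length - 2) 0 = a by
          rw [ha, show hs.length - 2 = jm by omega]]
        rw [hsetNa, if_neg (by omega)]
      · rw [hgj_ge (hs.length - 2) (by omega) (by omega), show hs.length - 2 + 1 = hs.length - 1 by omega,
          hsetN _ (by omega) (by omega)]
        exact inv.hnxtlast
    · -- hrightlast
      have hidx : hs'.length - 1 = hs.length - 2 := by omega
      rw [hidx]
      simp only []
      by_cases hlast : jm + 1 = hs.length - 1
      · rw [hgj_lt (hs.length - 2) (by omega) (by omega), show hs.getD (hs.length - 2) 0 = a by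
          rw [ha, show hs.length - 2 = jm by omega]]
        rw [pvGetD_set _ _ _ _ _ (by rw [hLr]; omega), if_pos rfl]
        rw [hRval, if_neg (by omega)]
      · rw [hgj_ge (hs.length - 2) (by omega) (by omega), show hs.length - 2 + 1 = hs.length - 1 by omega,
          hsetR (by omega) (by omega)]
        exact inv.hrightlast
    · -- hqok
      intro e he
      simp only [] at he
      rcases (hQmem e).1 he with h | ⟨h0, rfl⟩ | ⟨h1, rfl⟩
      · exact inv.hqok e (by rw [hsplit]; simp [h])
      · have hlt1 : hs.getD (jm-1) 0 < a := by
          rw [ha]; exact pvMono_getD inv.hmono (by omega) (by omega)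
        have hblt : ((b : Nat) : Int) ≤ R := by
          rw [hRval]
          split_ifs with h1
          · have : b < hs.getD (jm+2) 0 := pvMono_getD inv.hmono (by omega) h1
            omega
          · omega
        rw [hent1]
        refine ⟨?_, ?_, ?_, ?_, ?_, ?_, ?_⟩
        · show (1 : Int) ≤ ((a : Nat) : Int)
          omega
        · show ((a : Nat) : Int) < ((pts.length : Nat) : Int)
          exact_mod_cast han
        · show (0 : Int) ≤ ((hs.getD (jm-1) 0 : Nat) : Int)
          positivity
        · show ((hs.getD (jm-1) 0 : Nat) : Int) < ((a : Nat) : Int)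
          exact_mod_cast hlt1
        · show ((a : Nat) : Int) ≤ R
          omega
        · show R < ((pts.length : Nat) : Int)
          exact hRnn.2
        · show pvPtsD pts R - pts.getD (hs.getD (jm-1) 0) 0 =
            pvPtsD pts R - pvPtsD pts ((hs.getD (jm-1) 0 : Nat) : Int)
          simp [pvPtsD]
      · have hlt2 : a < hs.getD (jm+2) 0 := by
          rw [ha]; exact pvMono_getD inv.hmono (by omega) h1
        have hr2 := pvRight_val inv (jm+2) h1
        have hr2b : ((hs.getD (jm+2) 0 : Nat) : Int) ≤ s.right.getD (hs.getD (jm+2) 0) 0 ∧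
            s.right.getD (hs.getD (jm+2) 0) 0 < ((n : Nat) : Int) := by
          rw [hr2]
          split_ifs with h3
          · have h4 : hs.getD (jm+2) 0 < hs.getD (jm+2+1) 0 := pvMono_getD inv.hmono (by omega) h3
            have h5 := hbndD h3
            exact ⟨by omega, by omega⟩
          · have h5 := hbndD (k := jm + 2) (show jm + 2 < hs.length by omega)
            exact ⟨by omega, by omega⟩
        have hgb : hs.getD (jm+2) 0 < n := hbndD h1
        rw [hent2]
        refine ⟨?_, ?_, ?_, ?_, hr2b.1, hr2b.2, ?_⟩
        · show (1 : Int) ≤ ((hs.getD (jm+2) 0 : Nat) : Int)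
          omega
        · show ((hs.getD (jm+2) 0 : Nat) : Int) < ((pts.length : Nat) : Int)
          exact_mod_cast hgb
        · show (0 : Int) ≤ ((a : Nat) : Int)
          positivity
        · show ((a : Nat) : Int) < ((hs.getD (jm+2) 0 : Nat) : Int)
          exact_mod_cast hlt2
        · show pvPtsD pts (s.right.getD (hs.getD (jm+2) 0) 0) - pts.getD a 0 =
            pvPtsD pts (s.right.getD (hs.getD (jm+2) 0) 0) - pvPtsD pts ((a : Nat) : Int)
          simp [pvPtsD]
    · -- hqsorted
      exact hQsorted
    · -- hqcanon
      intro j hj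
      rw [hlen'] at hj
      simp only []
      by_cases hc1 : j + 1 < jm
      · rw [hgj_lt j (by omega) (by omega), hgj_lt (j+1) (by omega) (by omega)]
        have hcc : pvCanon pts (s.right.set a R) (hs.getD j 0) (hs.getD (j+1) 0) =
            pvCanon pts s.right (hs.getD j 0) (hs.getD (j+1) 0) := by
          simp only [pvCanon]
          rw [hsetR (by omega) (by omega)]
        rw [hcc]
        exact (hQmem _).2 (Or.inl (hcanon_q' j (by omega) (by omega)))
      · by_cases hc2 : j + 1 = jm
        · rw [hgj_lt j (by omega) (by omega), hgj_lt (j+1) (by omega) (by omega)]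
          have hcc : pvCanon pts (s.right.set a R) (hs.getD j 0) (hs.getD (j+1) 0) = ent1 := by
            rw [hc2, ← ha, hent1]
            simp only [pvCanon]
            rw [hgetRa]
            rw [show jm - 1 = j by omega]
          rw [hcc]
          exact (hQmem _).2 (Or.inr (Or.inl ⟨by omega, rfl⟩))
        · by_cases hc3 : j = jm
          · subst hc3
            rw [hgj_lt j (by omega) (by omega), hgj_ge (j+1) (by omega) (by omega), ← ha,
              show j + 1 + 1 = j + 2 by omega]
            have hcc : pvCanon pts (s.right.set a R) a (hs.getD (j+2) 0) = ent2 := by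
              rw [hent2]
              simp only [pvCanon]
              rw [hsetR (by omega) (by omega)]
            rw [hcc]
            exact (hQmem _).2 (Or.inr (Or.inr ⟨by omega, rfl⟩))
          · rw [hgj_ge j (by omega) (by omega), hgj_ge (j+1) (by omega) (by omega)]
            have hcc : pvCanon pts (s.right.set a R) (hs.getD (j+1) 0) (hs.getD (j+1+1) 0) =
                pvCanon pts s.right (hs.getD (j+1) 0) (hs.getD (j+1+1) 0) := by
              simp only [pvCanon]
              rw [hsetR (by omega) (by omega)]
            rw [hcc]
            exact (hQmem _).2 (Or.inl (hcanon_q' (j+1) (by omega) (by omega)))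
  refine ⟨hs', hinv', by omega, ?_⟩
  intro m hm
  have hKmin : PySem.List.min2? (pvAKeys (pvRepr pts s.right hs)) (fun x => x.1) (fun x => x.2) =
      some ((pvCanon pts s.right a b).1, ((jm+1 : Nat) : Int)) := by
    rw [pvAKeys_repr]
    apply pvMin2_eq_of_strict
    · apply List.mem_map.2
      refine ⟨jm+1, List.mem_range'_1.2 ⟨by omega, by omega⟩, ?_⟩
      rw [show jm + 1 - 1 = jm by omega]
    · intro x hx hne
      obtain ⟨j, hjr, rfl⟩ := List.mem_map.1 hx
      have hjb := List.mem_range'_1.1 hjr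
      have hjne : j ≠ jm + 1 := by
        intro h
        subst h
        exact hne (by rw [show jm + 1 - 1 = jm by omega])
      have hmj := hmin (j-1) (by omega)
      rw [show j - 1 + 1 = j by omega] at hmj
      rw [hecanon] at hmj
      have hjb2 : hs.getD j 0 ≠ b := pvMono_getD_ne inv.hmono (by omega) hjm hjne
      have hmono2 : jm + 1 < j → b < hs.getD j 0 := fun h => pvMono_getD inv.hmono h (by omega)
      have hmono3 : j < jm + 1 → hs.getD j 0 < b := fun h => pvMono_getD inv.hmono h hjm
      simp only [pvCanon, pvLt] at hmj ⊢
      omega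
  have hRG : ∀ (k : Nat) (hk : k < hs.length) (hk2 : k < (pvRepr pts s.right hs).length),
      (pvRepr pts s.right hs)[k]'hk2 =
        (pts.getD (hs.getD k 0) 0, pvPtsD pts (s.right.getD (hs.getD k 0) 0)) := by
    intro k hk hk2
    rw [← List.getD_eq_getElem _ (0,0) hk2]
    exact pvRepr_getD pts s.right hs hk
  conv_lhs => rw [pvALoop]
  rw [if_pos (show m < ((pvRepr pts s.right hs).length : Int) by simp [pvRepr]; omega)]
  rw [hKmin]
  simp only []
  rw [show ((jm+1 : Nat) : Int) - 1 = ((jm : Nat) : Int) by omega]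
  rw [PySem.List.pyGetD_natCast]
  rw [pvRepr_getD pts s.right hs (show jm < hs.length by omega)]
  rw [PySem.List.pop?_natCast (pvRepr pts s.right hs) (jm+1) (by simp [pvRepr]; omega)]
  simp only []
  rw [PySem.List.pySetD_natCast]
  congr 1
  have hrightcomp : (pvBStep pts (n : Int) s).right = s.right.set a R := by rw [hstate]
  rw [hrightcomp]
  apply List.ext_getElem
  · simp only [List.length_set, List.length_eraseIdx, pvRepr, List.length_map, hlen']
    split_ifs <;> omega
  · intro i h1 h2
    have hiL : i < hs.length - 1 := by
      simpa only [List.length_set, List.length_eraseIdx, pvRepr, List.length_map,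
        if_pos (show jm + 1 < hs.length by simpa [pvRepr] using hjm)] using h1
    rw [List.getElem_set]
    have hRHS : (pvRepr pts (s.right.set a R) hs')[i]'h2 =
        (pts.getD (hs'.getD i 0) 0, pvPtsD pts ((s.right.set a R).getD (hs'.getD i 0) 0)) := by
      rw [← List.getD_eq_getElem _ (0,0) h2]
      exact pvRepr_getD pts (s.right.set a R) hs' (by omega)
    rw [hRHS]
    by_cases hijm : jm = i
    · rw [if_pos hijm]
      subst hijm
      rw [hgj_lt jm (by omega) (by omega), ← ha, hgetRa]
      rw [hRG (jm+1) hjm (by simp [pvRepr]; omega)]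
    · rw [if_neg hijm]
      rw [List.getElem_eraseIdx]
      split_ifs with hlt
      · rw [hRG i (by omega) (by simp [pvRepr]; omega), hgj_lt i (by omega) (by omega)]
        rw [pvGetD_set _ _ _ _ _ (by rw [hLr]; exact hbndD (k := i) (by omega)),
          if_neg (fun hh => (hbne (k := i) (by omega) (by omega)) hh.symm)]
      · rw [hRG (i+1) (by omega) (by simp [pvRepr]; omega), hgj_ge i (by omega) (by omega)]
        rw [pvGetD_set _ _ _ _ _ (by rw [hLr]; exact hbndD (k := i+1) (by omega)),
          if_neg (fun hh => (hbne (k := i+1) (by omega) (by omega)) hh.symm)]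

lemma pvMain (pts : List Int) (m : Int) (hm : 1 ≤ m) :
    ∀ (k : Nat) (hs : List Nat) (s : pvBState), pvInv pts hs s →
      (hs.length : Int) = m + k →
      ∃ hs', pvInv pts hs' (pvBLoop pts (pts.length : Int) k s) ∧
        pvALoop m (pvRepr pts s.right hs) =
        pvRepr pts (pvBLoop pts (pts.length : Int) k s).right hs' := by
  intro k
  induction k with
  | zero =>
    intro hs s inv hlen
    refine ⟨hs, inv, ?_⟩
    rw [pvALoop, if_neg ?_]
    · rfl
    · simp only [pvRepr, List.length_map]; omega
  | succ k ih =>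
    intro hs s inv hlen
    obtain ⟨hs1, inv1, hlen1, hstep⟩ := pvStep_main pts hs s inv (by omega)
    obtain ⟨hs', inv', heq⟩ := ih hs1 (pvBStep pts (pts.length : Int) s) inv1 (by omega)
    exact ⟨hs', inv', by rw [hstep m (by omega)]; exact heq⟩

lemma pvFilter_eq {pts : List Int} {hs : List Nat} {s : pvBState} (inv : pvInv pts hs s) :
    (List.range pts.length).filter (fun i => s.alive.getD i false) = hs := by
  have hperm : ((List.range pts.length).filter (fun i => s.alive.getD i false)).Perm hs := by
    rw [List.perm_ext_iff_of_nodup ((List.nodup_range).filter _)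
      (inv.hmono.imp (fun h => Nat.ne_of_lt h))]
    intro a
    rw [List.mem_filter, List.mem_range]
    constructor
    · rintro ⟨h1, h2⟩
      exact (inv.halive a h1).1 h2
    · intro h
      exact ⟨inv.hbnd a h, (inv.halive a (inv.hbnd a h)).2 h⟩
  exact List.Perm.eq_of_pairwise (by intro a b _ _ h1 h2; omega)
    ((List.pairwise_lt_range).filter _) inv.hmono hperm

lemma pvFinal_eq {pts : List Int} {hs : List Nat} {s : pvBState} (inv : pvInv pts hs s) :
    (PySem.List.pyRange 0 (pts.length : Int) 1).foldl (fun acc i =>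
        if PySem.List.pyGetD s.alive i false then
          acc ++ [(PySem.List.pyGetD pts i 0,
                   PySem.List.pyGetD pts (PySem.List.pyGetD s.right i 0) 0)]
        else acc) [] = pvRepr pts s.right hs := by
  rw [PySem.List.pyRange_zero_natCast, PySem.List.foldl_append_if, List.nil_append]
  rw [List.filter_map, List.map_map]
  have hfil : (List.range pts.length).filter
      ((fun i => PySem.List.pyGetD s.alive i false) ∘ (fun k : Nat => (k : Int))) = hs := by
    rw [← pvFilter_eq inv]
    apply List.filter_congr
    intro i hi
    simp [Function.comp, PySem.List.pyGetD_natCast]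
  rw [hfil]
  apply List.map_congr_left
  intro h hmem
  have hnn := pvRight_nonneg inv hmem
  simp only [Function.comp, PySem.List.pyGetD_natCast]
  rw [PySem.List.pyGetD_of_nonneg _ _ hnn.1]
  simp [pvPtsD]

lemma pvRangeMap_getD (n : Nat) (f : Int → Int) {j : Nat} (hj : j < n) (d : Int) :
    (((List.range n).map (Nat.cast : Nat → Int)).map f).getD j d = f (j : Int) := by
  rw [List.getD_eq_getElem _ _ (by simpa using hj)]
  simp

lemma pvRange_getD (n : Nat) {j : Nat} (hj : j < n) (d : Int) :
    ((List.range n).map (Nat.cast : Nat → Int)).getD j d = (j : Int) := by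
  rw [List.getD_eq_getElem _ _ (by simpa using hj)]
  simp

lemma pvFoldlInsort : ∀ (l : List pvE) (q0 : List pvE), q0.Pairwise pvLe →
    ((l.foldl pvInsort q0).Pairwise pvLe ∧ ∀ x, (x ∈ l.foldl pvInsort q0 ↔ x ∈ q0 ∨ x ∈ l)) := by
  intro l
  induction l with
  | nil => intro q0 h; exact ⟨h, by simp⟩
  | cons e t ih =>
    intro q0 h
    obtain ⟨hs1, hm1⟩ := pvInsort_props q0 e h
    obtain ⟨hs2, hm2⟩ := ih (pvInsort q0 e) hs1
    refine ⟨by simpa using hs2, fun x => ?_⟩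
    simp only [List.foldl_cons]
    rw [hm2 x, hm1 x]
    simp only [List.mem_cons]
    tauto

def pvEnt0 (pts : List Int) (j : Nat) : pvE :=
  (pts.getD j 0 - pts.getD (j-1) 0, (j : Int), ((j-1 : Nat) : Int), (j : Int))

lemma pvInit (pts : List Int) (h1 : 1 ≤ pts.length) :
    pvInv pts (List.range pts.length)
      ⟨(PySem.List.pyRange 0 (pts.length : Int) 1).map (fun i => i - 1),
       (PySem.List.pyRange 0 (pts.length : Int) 1).map (fun i => i + 1),
       PySem.List.pyRange 0 (pts.length : Int) 1,
       List.replicate (pts.length : Int).toNat true,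
       (PySem.List.pyRange 1 (pts.length : Int) 1).foldl (fun q i =>
         pvInsort q (PySem.List.pyGetD pts i 0 - PySem.List.pyGetD pts (i - 1) 0, i, i - 1, i)) []⟩ := by
  have hn : ((pts.length : Int)).toNat = pts.length := by omega
  have hpr : PySem.List.pyRange 0 (pts.length : Int) 1 =
      (List.range pts.length).map (Nat.cast : Nat → Int) := PySem.List.pyRange_zero_natCast _
  have hq0 : (PySem.List.pyRange 1 (pts.length : Int) 1).foldl (fun q i =>
        pvInsort q (PySem.List.pyGetD pts i 0 - PySem.List.pyGetD pts (i - 1) 0, i, i - 1, i)) [] =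
      ((List.range' 1 (pts.length - 1)).map (pvEnt0 pts)).foldl pvInsort [] := by
    rw [pvPyRange_one' pts.length h1, List.foldl_map, List.foldl_map]
    apply PySem.List.foldl_congr_mem
    intro acc j hj
    have hjb : 1 ≤ j ∧ j < pts.length := by have := List.mem_range'_1.1 hj; omega
    have hc : ((j : Int) - 1) = ((j - 1 : Nat) : Int) := by omega
    simp [pvEnt0, PySem.List.pyGetD_natCast, hc]
  obtain ⟨hqs, hqm⟩ := pvFoldlInsort ((List.range' 1 (pts.length - 1)).map (pvEnt0 pts)) []
    (by simp)
  have hgr : ∀ j, j < pts.length → (List.range pts.length).getD j 0 = j := by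
    intro j hj
    rw [List.getD_eq_getElem _ _ (by simpa using hj), List.getElem_range]
  refine ⟨by simp [hpr], by simp [hpr], by simp [hpr], by simp [hn], ?_, ?_,
    List.pairwise_lt_range, ?_, ?_, ?_, ?_, ?_, ?_, ?_, ?_, ?_, ?_, ?_⟩
  · intro h
    rw [List.range_eq_nil] at h
    omega
  · exact hgr 0 (by omega)
  · intro h hh
    simpa using hh
  · intro i hi
    simp only [List.getD_eq_getElem _ _ (show i < (List.replicate (pts.length : Int).toNat true).length by simp [hn]; omega)]
    simp [List.mem_range, hi]
  · -- hnxt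
    intro j hj
    rw [List.length_range] at hj
    rw [hgr j (by omega), hgr (j+1) (by omega), hpr]
    rw [pvRangeMap_getD pts.length (fun i => i + 1) (by omega) 0]
    omega
  · -- hprev
    intro j hj
    rw [List.length_range] at hj
    rw [hgr j (by omega), hgr (j+1) (by omega), hpr]
    rw [pvRangeMap_getD pts.length (fun i => i - 1) (by omega) 0]
    omega
  · -- hright
    intro j hj
    rw [List.length_range] at hj
    rw [hgr j (by omega), hgr (j+1) (by omega), hpr]
    rw [pvRange_getD pts.length (by omega) 0]
    omega
  · -- hprev0
    rw [hpr, pvRangeMap_getD pts.length (fun i => i - 1) (by omega) 0]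
    omega
  · -- hnxtlast
    rw [List.length_range, hgr (pts.length - 1) (by omega), hpr,
      pvRangeMap_getD pts.length (fun i => i + 1) (by omega) 0]
    omega
  · -- hrightlast
    rw [List.length_range, hgr (pts.length - 1) (by omega), hpr,
      pvRange_getD pts.length (by omega) 0]
    omega
  · -- hqok
    intro e he
    rw [hq0] at he
    rcases (hqm e).1 he with h | h
    · simp at h
    · obtain ⟨j, hj, rfl⟩ := List.mem_map.1 h
      have hjb : 1 ≤ j ∧ j < pts.length := by have := List.mem_range'_1.1 hj; omega
      refine ⟨by simp [pvEnt0] <;> omega, by simp [pvEnt0] <;> omega, by simp [pvEnt0] <;> omega,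
        by simp [pvEnt0] <;> omega, by simp [pvEnt0] <;> omega, by simp [pvEnt0] <;> omega, ?_⟩
      simp [pvEnt0, pvPtsD]
  · -- hqsorted
    rw [hq0]
    exact hqs
  · -- hqcanon
    intro j hj
    rw [List.length_range] at hj
    rw [hgr j (by omega), hgr (j+1) (by omega), hq0]
    apply (hqm _).2
    right
    apply List.mem_map.2
    refine ⟨j + 1, List.mem_range'_1.2 (by omega), ?_⟩
    rw [hpr]
    simp only [pvCanon, pvEnt0, pvPtsD]
    rw [pvRange_getD pts.length (by omega) 0]
    simp

lemma pvRepr_init (pts : List Int) :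
    pvRepr pts (PySem.List.pyRange 0 (pts.length : Int) 1) (List.range pts.length) =
      pts.map (fun p => (p, p)) := by
  rw [PySem.List.pyRange_zero_natCast]
  apply List.ext_getElem
  · simp [pvRepr]
  · intro j hj1 hj2
    simp only [pvRepr, List.getElem_map, List.getElem_range]
    rw [List.getD_eq_getElem _ _ (by simpa [pvRepr] using hj1)]
    rw [pvRange_getD pts.length (by simpa [pvRepr] using hj1) 0]
    have hjp : j < pts.length := by simpa [pvRepr] using hj1
    simp [pvPtsD, List.getD_eq_getElem _ _ hjp, List.getElem?_eq_getElem hjp]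

-- ===== VERDICT (by name: the statement is the Claim_ definition above) =====
theorem identify_intervals_spec : Claim_equal_identify_intervals := by
  intro genome mutated m hdom hpre
  unfold Spec_identify_intervals
  by_cases hm0 : m = 0
  · simp [identify_intervals, identify_intervals_alt, hm0]
  · have hm1 : 1 ≤ m := by
      have : (0 : Int) ≤ m := hpre
      omega
    simp only [identify_intervals, identify_intervals_alt, if_neg hm0]
    set pts := ((PySem.List.enumerate (genome.toList.zip mutated.toList)).filter
        (fun p => p.2.1 != p.2.2)).map (fun p => p.1) with hpts
    have hAdiffs : ((PySem.List.enumerate (genome.toList.zip mutated.toList)).filter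
        (fun p => p.2.1 != p.2.2)).map (fun p => (p.1, p.1)) = pts.map (fun x => (x, x)) := by
      rw [hpts, List.map_map]
      rfl
    rw [hAdiffs]
    by_cases hnm : (pts.length : Int) ≤ m
    · rw [if_pos hnm, pvALoop, if_neg (by simp only [List.length_map]; omega)]
    · rw [if_neg hnm]
      obtain ⟨hs', inv', heq⟩ := pvMain pts m hm1 ((pts.length : Int) - m).toNat
        (List.range pts.length)
        ⟨(PySem.List.pyRange 0 (pts.length : Int) 1).map (fun i => i - 1),
         (PySem.List.pyRange 0 (pts.length : Int) 1).map (fun i => i + 1),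
         PySem.List.pyRange 0 (pts.length : Int) 1,
         List.replicate (pts.length : Int).toNat true,
         (PySem.List.pyRange 1 (pts.length : Int) 1).foldl (fun q i =>
           pvInsort q (PySem.List.pyGetD pts i 0 - PySem.List.pyGetD pts (i - 1) 0, i, i - 1, i)) []⟩
        (pvInit pts (by omega)) (by rw [List.length_range]; omega)
    -- A's initial diffs list is the representation of B's initial state
      have hstart : pts.map (fun x => (x, x)) = pvRepr pts
          (PySem.List.pyRange 0 (pts.length : Int) 1) (List.range pts.length) :=
        (pvRepr_init pts).symm
      rw [hstart, heq]
      exact (pvFinal_eq inv').symm
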